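-- pv_equiv track=rewrite | github.com/s1g9/automated-job-agent | indeed_scraper.py | filter_operations_jobs
-- ===== SOURCE A (Python) =====
-- from typing import List, Dict
--
-- def filter_operations_jobs(jobs: List[Dict]) -> List[Dict]:
--     """Filter jobs for operations roles"""
--     operations_keywords = [
--         'operations', 'coordinator', 'executive', 'associate',
--         'analyst', 'admin', 'program', 'business operations'
--     ]
--
--     filtered_jobs = []
--     for job in jobs:
--         title_lower = job.get('title', '').lower()
--         if any(keyword in title_lower for keyword in operations_keywords):
--             filtered_jobs.append(job)
--
--     return filtered_jobs
-- ===== SOURCE B (Python) =====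
-- # Single-pass multi-pattern scan: walk the title once, maintaining a worklist of
-- # partial keyword matches, instead of running a separate substring search per keyword.
-- # 'business operations' is omitted: it contains 'operations', so it can never
-- # change the outcome of the test.
-- _KEYWORDS = ['operations', 'coordinator', 'executive', 'associate',
--              'analyst', 'admin', 'program']
--
--
-- def _contains_keyword(title):
--     active = []  # (keyword, chars_matched) pairs currently in progress
--     for c in title:
--         nxt = [(k, j + 1) for (k, j) in active if k[j] == c]
--         nxt += [(k, 1) for k in _KEYWORDS if k[0] == c]
--         if any(j == len(k) for (k, j) in nxt):
--             return True
--         active = [(k, j) for (k, j) in nxt if j < len(k)]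
--     return False
--
--
-- def filter_operations_jobs(jobs):
--     """Filter jobs for operations roles"""
--     return [job for job in jobs if _contains_keyword(job.get('title', '').lower())]
-- ===== Notes on version B (the rewrite author's own statement) =====
-- stated objective: alternative
-- what changed: B replaces the per-keyword substring searches with a single left-to-right pass over each title that maintains a worklist of in-progress partial keyword matches (NFA-style multi-pattern scan, early exit on the first completed match), and drops the redundant keyword 'business operations' (it contains 'operations').
import Mathlib
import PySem

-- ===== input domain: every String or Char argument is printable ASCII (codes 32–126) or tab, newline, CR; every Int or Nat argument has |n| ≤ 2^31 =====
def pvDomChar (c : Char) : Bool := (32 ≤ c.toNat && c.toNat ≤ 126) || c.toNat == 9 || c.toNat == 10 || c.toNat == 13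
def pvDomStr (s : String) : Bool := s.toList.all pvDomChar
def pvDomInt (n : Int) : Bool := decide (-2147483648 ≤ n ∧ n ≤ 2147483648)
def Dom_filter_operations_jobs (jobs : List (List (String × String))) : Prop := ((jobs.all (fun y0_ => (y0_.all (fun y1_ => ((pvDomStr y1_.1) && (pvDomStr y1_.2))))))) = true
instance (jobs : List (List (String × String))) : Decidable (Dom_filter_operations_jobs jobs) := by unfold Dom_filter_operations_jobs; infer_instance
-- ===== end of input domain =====

-- B replaces the per-keyword substring tests with a single pass over each title that
-- maintains a worklist of in-progress partial keyword matches, and drops the redundant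
-- keyword 'business operations' (alternative algorithm, same return value).


-- ===== PORT A =====
def pvKeywordsA : List String :=
  ["operations", "coordinator", "executive", "associate",
   "analyst", "admin", "program", "business operations"]

def filter_operations_jobs (jobs : List (List (String × String))) : List (List (String × String)) :=
  jobs.foldl (fun filtered_jobs job =>
    let title_lower := PySem.Str.lower (PySem.Dict.getD (PySem.Dict.mk job) "title" "")
    if pvKeywordsA.any (fun keyword => PySem.Str.isIn keyword title_lower) then
      filtered_jobs ++ [job]
    else filtered_jobs) []

-- ===== PORT B =====
def pvKeywordsB : List (List Char) :=
  ["operations".toList, "coordinator".toList, "executive".toList, "associate".toList,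
   "analyst".toList, "admin".toList, "program".toList]

-- the single-pass scan of _contains_keyword; (k, j) = keyword k with its first j chars matched.
-- Python's k[j] is k.getD j ' ': every stored pair has j < k.length, so the default is never read.
def pvScan : List (List Char × Nat) → List Char → Bool
  | _, [] => false
  | active, c :: rest =>
    let nxt := ((active.filter (fun p => p.1.getD p.2 ' ' == c)).map (fun p => (p.1, p.2 + 1)))
      ++ ((pvKeywordsB.filter (fun k => k.getD 0 ' ' == c)).map (fun k => (k, 1)))
    if nxt.any (fun p => p.2 == p.1.length) then true
    else pvScan (nxt.filter (fun p => p.2 < p.1.length)) rest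

def filter_operations_jobs_alt (jobs : List (List (String × String))) : List (List (String × String)) :=
  jobs.filter (fun job =>
    pvScan [] ((PySem.Str.lower (PySem.Dict.getD (PySem.Dict.mk job) "title" "")).toList))

-- ===== PRECONDITION & SPEC =====
def Spec_filter_operations_jobs (jobs : List (List (String × String))) (out : List (List (String × String))) : Prop := out = filter_operations_jobs_alt jobs
instance (jobs : List (List (String × String))) (out : List (List (String × String))) : Decidable (Spec_filter_operations_jobs jobs out) := by unfold Spec_filter_operations_jobs; infer_instance

-- ===== CLAIM (what is proved, stated in full; the proofs are below) =====
def Claim_equal_filter_operations_jobs : Prop := ∀ (jobs : List (List (String × String))), Dom_filter_operations_jobs jobs → Spec_filter_operations_jobs jobs (filter_operations_jobs jobs)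

-- ===== LEMMAS AND PROOFS =====

lemma pvKeywordsB_ne_nil : ∀ k ∈ pvKeywordsB, k ≠ [] := by decide

-- one step of a partial match: the tail of k from position j < len continues into c :: rest
-- iff k's j-th char is c and the tail from j+1 continues into rest
lemma drop_prefix_cons {k : List Char} {j : Nat} (hj : j < k.length) (c : Char) (rest : List Char) :
    k.drop j <+: c :: rest ↔ (k.getD j ' ' = c ∧ k.drop (j + 1) <+: rest) := by
  rw [List.drop_eq_getElem_cons hj, List.cons_prefix_cons, List.getD_eq_getElem k ' ' hj]

-- the scan finds a match iff some in-progress match completes inside t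
-- or some keyword occurs in t
lemma pvScan_iff (t : List Char) : ∀ (active : List (List Char × Nat)),
    (∀ p ∈ active, p.2 < p.1.length) →
    (pvScan active t = true ↔
      (∃ p ∈ active, p.1.drop p.2 <+: t) ∨ ∃ k ∈ pvKeywordsB, k <:+: t) := by
  induction t with
  | nil =>
      intro active hinv
      constructor
      · intro h; simp [pvScan] at h
      · rintro (⟨p, hp, hpre⟩ | ⟨k, hk, hinf⟩)
        · have h1 := hinv p hp
          have h2 := List.drop_eq_nil_iff.1 (List.prefix_nil.1 hpre)
          omega
        · exact absurd (List.infix_nil.1 hinf) (pvKeywordsB_ne_nil k hk)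
  | cons c rest ih =>
      intro active hinv
      simp only [pvScan]
      -- membership in nxt
      set nxt := ((active.filter (fun p => p.1.getD p.2 ' ' == c)).map (fun p => (p.1, p.2 + 1)))
        ++ ((pvKeywordsB.filter (fun k => k.getD 0 ' ' == c)).map (fun k => (k, 1))) with hnxt
      have hmem : ∀ p, p ∈ nxt ↔
          ((∃ q ∈ active, q.1.getD q.2 ' ' = c ∧ p = (q.1, q.2 + 1)) ∨
           (∃ k ∈ pvKeywordsB, k.getD 0 ' ' = c ∧ p = (k, 1))) := by
        intro p
        simp only [hnxt, List.mem_append, List.mem_map, List.mem_filter, beq_iff_eq]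
        constructor
        · rintro (⟨q, ⟨hq, hqc⟩, rfl⟩ | ⟨k, ⟨hk, hkc⟩, rfl⟩)
          · exact Or.inl ⟨q, hq, hqc, rfl⟩
          · exact Or.inr ⟨k, hk, hkc, rfl⟩
        · rintro (⟨q, hq, hqc, rfl⟩ | ⟨k, hk, hkc, rfl⟩)
          · exact Or.inl ⟨q, ⟨hq, hqc⟩, rfl⟩
          · exact Or.inr ⟨k, ⟨hk, hkc⟩, rfl⟩
      have hle : ∀ p ∈ nxt, p.2 ≤ p.1.length := by
        intro p hp
        rcases (hmem p).1 hp with ⟨q, hq, _, rfl⟩ | ⟨k, hk, _, rfl⟩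
        · exact hinv q hq
        · have hk0 : k.length ≠ 0 := by
            simpa [List.length_eq_zero_iff] using pvKeywordsB_ne_nil k hk
          show 1 ≤ k.length
          omega
      -- the key bridge: a pair of nxt continues into rest iff it is already complete
      -- or it survives the filter and continues into rest
      have hsplit : (∃ p ∈ nxt, p.1.drop p.2 <+: rest) ↔
          ((nxt.any (fun p => p.2 == p.1.length)) = true ∨
           ∃ p ∈ nxt.filter (fun p => p.2 < p.1.length), p.1.drop p.2 <+: rest) := by
        constructor
        · rintro ⟨p, hp, hpre⟩
          rcases Nat.lt_or_ge p.2 p.1.length with hlt | hge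
          · exact Or.inr ⟨p, List.mem_filter.2 ⟨hp, by simpa using hlt⟩, hpre⟩
          · have : p.2 = p.1.length := le_antisymm (hle p hp) hge
            exact Or.inl (List.any_eq_true.2 ⟨p, hp, by simpa using this⟩)
        · rintro (h | ⟨p, hp, hpre⟩)
          · rcases List.any_eq_true.1 h with ⟨p, hp, hpe⟩
            refine ⟨p, hp, ?_⟩
            have : p.2 = p.1.length := by simpa using hpe
            simp [this]
          · exact ⟨p, (List.mem_filter.1 hp).1, hpre⟩
      -- rewrite the RHS through one character
      have hR : ((∃ p ∈ active, p.1.drop p.2 <+: c :: rest) ∨ ∃ k ∈ pvKeywordsB, k <:+: c :: rest) ↔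
          ((∃ p ∈ nxt, p.1.drop p.2 <+: rest) ∨ ∃ k ∈ pvKeywordsB, k <:+: rest) := by
        constructor
        · rintro (⟨p, hp, hpre⟩ | ⟨k, hk, hinf⟩)
          · rcases (drop_prefix_cons (hinv p hp) c rest).1 hpre with ⟨hc, htail⟩
            exact Or.inl ⟨(p.1, p.2 + 1), (hmem _).2 (Or.inl ⟨p, hp, hc, rfl⟩), htail⟩
          · rcases List.infix_cons_iff.1 hinf with hpre | hinf'
            · have hk0 : 0 < k.length := by
                have := pvKeywordsB_ne_nil k hk
                have : k.length ≠ 0 := by simpa [List.length_eq_zero_iff] using this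
                omega
              rcases (drop_prefix_cons (by simpa using hk0) c rest).1 (by simpa using hpre) with ⟨hc, htail⟩
              exact Or.inl ⟨(k, 1), (hmem _).2 (Or.inr ⟨k, hk, hc, rfl⟩), by simpa using htail⟩
            · exact Or.inr ⟨k, hk, hinf'⟩
        · rintro (⟨p, hp, hpre⟩ | ⟨k, hk, hinf⟩)
          · rcases (hmem p).1 hp with ⟨q, hq, hqc, rfl⟩ | ⟨k, hk, hkc, rfl⟩
            · exact Or.inl ⟨q, hq, (drop_prefix_cons (hinv q hq) c rest).2 ⟨hqc, hpre⟩⟩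
            · have hk0 : 0 < k.length := by
                have := pvKeywordsB_ne_nil k hk
                have : k.length ≠ 0 := by simpa [List.length_eq_zero_iff] using this
                omega
              refine Or.inr ⟨k, hk, List.infix_cons_iff.2 (Or.inl ?_)⟩
              have := (drop_prefix_cons (by simpa using hk0) c rest).2 ⟨hkc, by simpa using hpre⟩
              simpa using this
          · exact Or.inr ⟨k, hk, List.infix_cons_iff.2 (Or.inr hinf)⟩
      rw [hR, hsplit]
      have hinv' : ∀ p ∈ nxt.filter (fun p => p.2 < p.1.length), p.2 < p.1.length := by
        intro p hp; simpa using (List.mem_filter.1 hp).2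
      by_cases hcomp : (nxt.any (fun p => p.2 == p.1.length)) = true
      · simp [hcomp]
      · rw [if_neg hcomp, ih _ hinv']
        simp only [hcomp, Bool.false_eq_true, false_or]

-- 'business operations' is redundant: it contains 'operations'
lemma ops_infix_of_busops {t : List Char}
    (h : "business operations".toList <:+: t) : "operations".toList <:+: t :=
  List.IsInfix.trans (by decide) h

-- the per-element tests of A and B agree
lemma test_eq (s : String) :
    pvKeywordsA.any (fun keyword => PySem.Str.isIn keyword s) = pvScan [] s.toList := by
  rw [Bool.eq_iff_iff]
  rw [pvScan_iff s.toList [] (by simp)]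
  simp only [List.any_eq_true, PySem.Str.isIn_eq, PySem.Chars.isIn_iff_infix,
    false_and, exists_false, false_or, List.mem_nil_iff]
  constructor
  · rintro ⟨k, hk, h⟩
    simp only [pvKeywordsA, List.mem_cons, List.not_mem_nil, or_false] at hk
    rcases hk with rfl | rfl | rfl | rfl | rfl | rfl | rfl | rfl
    · exact ⟨"operations".toList, by simp [pvKeywordsB], h⟩
    · exact ⟨"coordinator".toList, by simp [pvKeywordsB], h⟩
    · exact ⟨"executive".toList, by simp [pvKeywordsB], h⟩
    · exact ⟨"associate".toList, by simp [pvKeywordsB], h⟩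
    · exact ⟨"analyst".toList, by simp [pvKeywordsB], h⟩
    · exact ⟨"admin".toList, by simp [pvKeywordsB], h⟩
    · exact ⟨"program".toList, by simp [pvKeywordsB], h⟩
    · exact ⟨"operations".toList, by simp [pvKeywordsB], ops_infix_of_busops h⟩
  · rintro ⟨k, hk, h⟩
    simp only [pvKeywordsB, List.mem_cons, List.not_mem_nil, or_false] at hk
    rcases hk with rfl | rfl | rfl | rfl | rfl | rfl | rfl
    · exact ⟨"operations", by simp [pvKeywordsA], h⟩
    · exact ⟨"coordinator", by simp [pvKeywordsA], h⟩
    · exact ⟨"executive", by simp [pvKeywordsA], h⟩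
    · exact ⟨"associate", by simp [pvKeywordsA], h⟩
    · exact ⟨"analyst", by simp [pvKeywordsA], h⟩
    · exact ⟨"admin", by simp [pvKeywordsA], h⟩
    · exact ⟨"program", by simp [pvKeywordsA], h⟩

-- ===== VERDICT (by name: the statement is the Claim_ definition above) =====
theorem filter_operations_jobs_spec : Claim_equal_filter_operations_jobs := by
  intro jobs _
  unfold Spec_filter_operations_jobs filter_operations_jobs filter_operations_jobs_alt
  rw [PySem.List.foldl_append_if
    (fun job => pvKeywordsA.any (fun keyword =>
      PySem.Str.isIn keyword (PySem.Str.lower (PySem.Dict.getD (PySem.Dict.mk job) "title" "")))) (fun job => job)]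
  simp only [List.map_id_fun', id, List.nil_append]
  congr 1
  funext job
  exact test_eq _
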